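-- pv_equiv track=rewrite | github.com/DNYoussef/AIVillage | production/rag/rag_system/utils/graph_utils.py | distance_sensitive_linearization
-- ===== SOURCE A (Python) =====
-- from typing import Dict, List
--
-- def distance_sensitive_linearization(graph: Dict[str, List[str]], anchor: str) -> List[str]:
--     distances = {anchor: 0}
--     queue = [(anchor, 0)]
--     linearized = []
--
--     while queue:
--         node, dist = queue.pop(0)
--         linearized.append(node)
--         for neighbor in graph.get(node, []):
--             if neighbor not in distances:
--                 distances[neighbor] = dist + 1
--                 queue.append((neighbor, dist + 1))
--
--     return sorted(linearized, key=lambda x: distances[x], reverse=True)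
-- ===== SOURCE B (Python) =====
-- def distance_sensitive_linearization(graph, anchor):
--     # One-pass BFS that buckets nodes by level as they are dequeued (index
--     # cursor instead of pop(0)), then emits the buckets from the deepest
--     # level down -- no sort needed.
--     seen = {anchor}
--     levels = {}
--     queue = [(anchor, 0)]
--     i = 0
--     while i < len(queue):
--         node, dist = queue[i]
--         i += 1
--         levels.setdefault(dist, []).append(node)
--         for neighbor in graph.get(node, []):
--             if neighbor not in seen:
--                 seen.add(neighbor)
--                 queue.append((neighbor, dist + 1))
--     out = []
--     for d in range(len(levels) - 1, -1, -1):
--         out.extend(levels[d])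
--     return out
-- ===== Notes on version B (the rewrite author's own statement) =====
-- stated objective: alternative
-- what changed: B buckets each dequeued BFS node into a per-distance level dict and emits the levels from the deepest down, replacing A's final stable reverse sort, and advances an index cursor over the queue instead of queue.pop(0).
import Mathlib
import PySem

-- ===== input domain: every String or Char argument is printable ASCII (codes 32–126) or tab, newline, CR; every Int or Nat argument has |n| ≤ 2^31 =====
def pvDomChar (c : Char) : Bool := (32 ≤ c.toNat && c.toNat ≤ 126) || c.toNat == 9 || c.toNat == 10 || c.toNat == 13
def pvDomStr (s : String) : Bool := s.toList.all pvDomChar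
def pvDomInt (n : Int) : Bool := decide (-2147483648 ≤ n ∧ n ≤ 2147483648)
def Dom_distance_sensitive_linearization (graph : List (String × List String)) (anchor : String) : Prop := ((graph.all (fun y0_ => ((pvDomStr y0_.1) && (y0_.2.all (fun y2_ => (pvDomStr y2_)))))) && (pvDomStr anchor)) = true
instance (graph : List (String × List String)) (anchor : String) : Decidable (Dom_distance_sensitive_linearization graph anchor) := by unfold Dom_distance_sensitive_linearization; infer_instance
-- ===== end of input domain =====

-- B replaces A's final sort of the BFS order by bucketing each dequeued node into its level and
-- emitting the buckets deepest-level-first, and replaces queue.pop(0) by an advancing cursor.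

-- ===== PORT A =====
-- the BFS while-loop of A; `fuel` is only a termination guard (an upper bound on the number of
-- iterations: the loop pops once per push, and pushes are bounded by 1 + total neighbour count)
def dsFuel (graph : List (String × List String)) : Nat :=
  2 + (graph.map (fun p => p.2.length)).sum

def dsLoopA (graph : List (String × List String)) :
    Nat → List (String × Int) → PySem.Dict String Int → List String →
    (List String × PySem.Dict String Int)
  | 0, _, distances, linearized => (linearized, distances)
  | _ + 1, [], distances, linearized => (linearized, distances)
  | fuel + 1, (node, dist) :: rest, distances, linearized =>
    -- for neighbor in graph.get(node, []): if neighbor not in distances: … append …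
    let st := (PySem.Dict.getD ⟨graph⟩ node []).foldl
      (fun (st : PySem.Dict String Int × List (String × Int)) neighbor =>
        if !(st.1.contains neighbor) then
          (st.1.insert neighbor (dist + 1), st.2 ++ [(neighbor, dist + 1)])
        else st)
      (distances, rest)
    dsLoopA graph fuel st.2 st.1 (linearized ++ [node])

def distance_sensitive_linearization (graph : List (String × List String)) (anchor : String) : List String :=
  let st := dsLoopA graph (dsFuel graph) [(anchor, 0)] (PySem.Dict.mk [(anchor, 0)]) []
  -- sorted(linearized, key=lambda x: distances[x], reverse=True); every element of linearized
  -- is a key of distances, so the getD default is never read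
  PySem.List.sorted st.1 (fun x => st.2.getD x 0) true

-- ===== PORT B =====
-- the BFS while-loop of B: cursor i over a growing queue; buckets each dequeued node by level
def dsLoopB (graph : List (String × List String)) :
    Nat → List (String × Int) → Nat → PySem.Set String → PySem.Dict Int (List String) →
    PySem.Dict Int (List String)
  | 0, _, _, _, levels => levels
  | fuel + 1, queue, i, seen, levels =>
    match queue[i]? with      -- while i < len(queue): node, dist = queue[i]
    | none => levels
    | some (node, dist) =>
      -- levels.setdefault(dist, []).append(node)
      let levels' := levels.modify dist [] (· ++ [node])
      let st := (PySem.Dict.getD ⟨graph⟩ node []).foldl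
        (fun (st : PySem.Set String × List (String × Int)) neighbor =>
          if !(PySem.Set.contains st.1 neighbor) then
            (PySem.Set.add st.1 neighbor, st.2 ++ [(neighbor, dist + 1)])
          else st)
        (seen, queue)
      dsLoopB graph fuel st.2 (i + 1) st.1 levels'

def distance_sensitive_linearization_alt (graph : List (String × List String)) (anchor : String) : List String :=
  let levels := dsLoopB graph (dsFuel graph) [(anchor, 0)] 0 (PySem.Set.ofList [anchor]) (PySem.Dict.mk [])
  -- for d in range(len(levels) - 1, -1, -1): out.extend(levels[d]); d is always a key of
  -- levels (its keys are exactly 0..len-1), so the getD default is never read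
  (PySem.List.pyRange ((levels.size : Int) - 1) (-1) (-1)).foldl
    (fun out d => out ++ levels.getD d []) []

-- ===== PRECONDITION & SPEC =====
def Spec_distance_sensitive_linearization (graph : List (String × List String)) (anchor : String) (out : List String) : Prop := out = distance_sensitive_linearization_alt graph anchor
instance (graph : List (String × List String)) (anchor : String) (out : List String) : Decidable (Spec_distance_sensitive_linearization graph anchor out) := by unfold Spec_distance_sensitive_linearization; infer_instance

-- ===== CLAIM (what is proved, stated in full; the proofs are below) =====
def Claim_equal_distance_sensitive_linearization : Prop := ∀ (graph : List (String × List String)) (anchor : String), Dom_distance_sensitive_linearization graph anchor → Spec_distance_sensitive_linearization graph anchor (distance_sensitive_linearization graph anchor)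

-- ===== LEMMAS AND PROOFS =====

-- abbreviations for the two inner neighbour-loop bodies (definitionally the lambdas in the ports)
def dsStepA (dist : Int) (st : PySem.Dict String Int × List (String × Int)) (neighbor : String) :
    PySem.Dict String Int × List (String × Int) :=
  if !(st.1.contains neighbor) then
    (st.1.insert neighbor (dist + 1), st.2 ++ [(neighbor, dist + 1)])
  else st

def dsStepB (dist : Int) (st : PySem.Set String × List (String × Int)) (neighbor : String) :
    PySem.Set String × List (String × Int) :=
  if !(PySem.Set.contains st.1 neighbor) then
    (PySem.Set.add st.1 neighbor, st.2 ++ [(neighbor, dist + 1)])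
  else st


theorem dsInner (dist : Int) :
    ∀ (ns : List String) (distances : PySem.Dict String Int) (seen : PySem.Set String)
      (qA qB : List (String × Int)),
    (∀ s, distances.contains s = true ↔ s ∈ seen) →
    ∃ new : List String,
      (ns.foldl (dsStepA dist) (distances, qA)).2 = qA ++ new.map (fun n => (n, dist + 1)) ∧
      (ns.foldl (dsStepB dist) (seen, qB)).2 = qB ++ new.map (fun n => (n, dist + 1)) ∧
      (∀ s, (ns.foldl (dsStepA dist) (distances, qA)).1.contains s = true ↔
            s ∈ (ns.foldl (dsStepB dist) (seen, qB)).1) ∧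
      (∀ x v, distances.get? x = some v →
            (ns.foldl (dsStepA dist) (distances, qA)).1.get? x = some v) ∧
      (∀ n ∈ new, (ns.foldl (dsStepA dist) (distances, qA)).1.get? n = some (dist + 1)) := by
  intro ns
  induction ns with
  | nil =>
    intro distances seen qA qB hinv
    exact ⟨[], by simp, by simp, fun s => by simpa using hinv s, fun x v h => h, by simp⟩
  | cons x ns' ih =>
    intro distances seen qA qB hinv
    by_cases hx : distances.contains x = true
    · -- already seen: both steps skip
      have hmem : x ∈ seen := (hinv x).mp hx
      have hA : dsStepA dist (distances, qA) x = (distances, qA) := by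
        simp [dsStepA, hx]
      have hB : dsStepB dist (seen, qB) x = (seen, qB) := by
        simp [dsStepB, hmem]
      simp only [List.foldl_cons, hA, hB]
      exact ih distances seen qA qB hinv
    · -- new node: both push it
      have hnmem : x ∉ seen := fun hc => hx ((hinv x).mpr hc)
      have hA : dsStepA dist (distances, qA) x
          = (distances.insert x (dist + 1), qA ++ [(x, dist + 1)]) := by
        simp [dsStepA, hx]
      have hB : dsStepB dist (seen, qB) x
          = (PySem.Set.add seen x, qB ++ [(x, dist + 1)]) := by
        simp [dsStepB, hnmem]
      have hinv' : ∀ s, (distances.insert x (dist + 1)).contains s = true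
          ↔ s ∈ PySem.Set.add seen x := by
        intro s
        rw [PySem.Dict.contains_insert, PySem.Set.mem_add]
        simp only [Bool.or_eq_true, beq_iff_eq]
        rw [hinv s]
        tauto
      obtain ⟨new', h1, h2, h3, h4, h5⟩ :=
        ih (distances.insert x (dist + 1)) (PySem.Set.add seen x)
          (qA ++ [(x, dist + 1)]) (qB ++ [(x, dist + 1)]) hinv'
      have hxnone : distances.get? x = none := by
        rw [PySem.Dict.get?_eq_none_iff_contains]
        simpa using hx
      refine ⟨x :: new', ?_, ?_, ?_, ?_, ?_⟩
      · simp only [List.foldl_cons, hA, h1, List.map_cons]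
        simp
      · simp only [List.foldl_cons, hB, h2, List.map_cons]
        simp
      · simp only [List.foldl_cons, hA, hB]
        exact h3
      · intro x0 v h
        have hne : x0 ≠ x := by
          intro he; rw [he, hxnone] at h; simp at h
        simp only [List.foldl_cons, hA]
        exact h4 x0 v (by rw [PySem.Dict.get?_insert, if_neg hne]; exact h)
      · intro n hn
        simp only [List.foldl_cons, hA]
        rcases List.mem_cons.mp hn with rfl | hn'
        · exact h4 n (dist + 1) (PySem.Dict.get?_insert_self _ _ _)
        · exact h5 n hn'

theorem dsLoopA_cons (graph : List (String × List String)) (fuel : Nat) (node : String)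
    (dist : Int) (rest : List (String × Int)) (distances : PySem.Dict String Int)
    (lin : List String) :
    dsLoopA graph (fuel + 1) ((node, dist) :: rest) distances lin
      = dsLoopA graph fuel
          ((PySem.Dict.getD ⟨graph⟩ node []).foldl (dsStepA dist) (distances, rest)).2
          ((PySem.Dict.getD ⟨graph⟩ node []).foldl (dsStepA dist) (distances, rest)).1
          (lin ++ [node]) := rfl

theorem dsLoopB_step (graph : List (String × List String)) (fuel : Nat)
    (queue : List (String × Int)) (i : Nat) (seen : PySem.Set String)
    (levels : PySem.Dict Int (List String)) (node : String) (dist : Int)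
    (hq : queue[i]? = some (node, dist)) :
    dsLoopB graph (fuel + 1) queue i seen levels
      = dsLoopB graph fuel
          ((PySem.Dict.getD ⟨graph⟩ node []).foldl (dsStepB dist) (seen, queue)).2
          (i + 1)
          ((PySem.Dict.getD ⟨graph⟩ node []).foldl (dsStepB dist) (seen, queue)).1
          (levels.modify dist [] (· ++ [node])) := by
  conv_lhs => rw [dsLoopB]
  rw [hq]
  rfl

theorem dsLoopB_none (graph : List (String × List String)) (fuel : Nat)
    (queue : List (String × Int)) (i : Nat) (seen : PySem.Set String)
    (levels : PySem.Dict Int (List String)) (hq : queue[i]? = none) :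
    dsLoopB graph (fuel + 1) queue i seen levels = levels := by
  simp [dsLoopB, hq]

theorem dsMain (graph : List (String × List String)) :
    ∀ (fuel : Nat) (queueB : List (String × Int)) (i : Nat)
      (distances : PySem.Dict String Int) (seen : PySem.Set String)
      (levels : PySem.Dict Int (List String)) (Ls : List (List String)),
    (∀ s, distances.contains s = true ↔ s ∈ seen) →
    (∀ n d, (n, d) ∈ queueB.drop i → distances.get? n = some d) →
    List.Pairwise (fun p q : String × Int => p.2 ≤ q.2) (queueB.drop i) →
    (∀ p ∈ queueB.drop i, p.2 = (Ls.length : Int) ∨ (Ls ≠ [] ∧ p.2 = (Ls.length : Int) - 1)) →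
    levels.keys = (List.range Ls.length).map (fun j : Nat => (j : Int)) →
    (∀ (j : Nat) (h : j < Ls.length), levels.getD (j : Int) [] = Ls[j]) →
    (∀ (j : Nat) (h : j < Ls.length), ∀ x ∈ Ls[j], distances.get? x = some (j : Int)) →
    ∃ LsF : List (List String),
      (dsLoopA graph fuel (queueB.drop i) distances Ls.flatten).1 = LsF.flatten ∧
      (∀ (j : Nat) (h : j < LsF.length), ∀ x ∈ LsF[j],
          (dsLoopA graph fuel (queueB.drop i) distances Ls.flatten).2.get? x = some (j : Int)) ∧
      (dsLoopB graph fuel queueB i seen levels).keys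
          = (List.range LsF.length).map (fun j : Nat => (j : Int)) ∧
      (∀ (j : Nat) (h : j < LsF.length),
          (dsLoopB graph fuel queueB i seen levels).getD (j : Int) [] = LsF[j]) := by
  intro fuel
  induction fuel with
  | zero =>
    intro queueB i distances seen levels Ls hinv h3 h7a h7b hkeys hgetD h6
    exact ⟨Ls, by simp [dsLoopA], by simpa [dsLoopA] using h6,
      by simpa [dsLoopB] using hkeys, by simpa [dsLoopB] using hgetD⟩
  | succ fuel ih =>
    intro queueB i distances seen levels Ls hinv h3 h7a h7b hkeys hgetD h6
    cases hq : queueB[i]? with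
    | none =>
      have hdrop : queueB.drop i = [] :=
        List.drop_eq_nil_iff.mpr (List.getElem?_eq_none_iff.mp hq)
      rw [hdrop, dsLoopB_none graph fuel queueB i seen levels hq]
      exact ⟨Ls, by simp [dsLoopA], by simpa [dsLoopA] using h6, hkeys, hgetD⟩
    | some p =>
      obtain ⟨node, dist⟩ := p
      have hi : i < queueB.length := (List.getElem?_eq_some_iff.mp hq).1
      have hdrop : queueB.drop i = (node, dist) :: queueB.drop (i + 1) := by
        rw [List.drop_eq_getElem_cons hi, (List.getElem?_eq_some_iff.mp hq).2]
      obtain ⟨new, hA2, hB2, hinv', hpres, hnew⟩ :=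
        dsInner dist (PySem.Dict.getD ⟨graph⟩ node []) distances seen
          (queueB.drop (i + 1)) queueB hinv
      have hhead3 : distances.get? node = some dist := h3 node dist (by rw [hdrop]; simp)
      have hpc0 := List.pairwise_cons.mp (hdrop ▸ h7a)
      have hpc : (∀ a' ∈ List.drop (i + 1) queueB, dist ≤ a'.2) ∧
          List.Pairwise (fun p q : String × Int => p.2 ≤ q.2) (List.drop (i + 1) queueB) := hpc0
      have hheadcase0 := h7b (node, dist) (by rw [hdrop]; simp)
      have hheadcase : dist = (Ls.length : Int) ∨ (Ls ≠ [] ∧ dist = (Ls.length : Int) - 1) :=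
        hheadcase0
      -- the new queue seen by the recursive calls
      have hq' : (queueB ++ new.map (fun n => (n, dist + 1))).drop (i + 1)
          = queueB.drop (i + 1) ++ new.map (fun n => (n, dist + 1)) :=
        List.drop_append_of_le_length (by omega)
      have hmemold : ∀ p ∈ queueB.drop (i + 1), p ∈ queueB.drop i := by
        intro p hp; rw [hdrop]; exact List.mem_cons_of_mem _ hp
      have hsndnew : ∀ p ∈ new.map (fun n => (n, dist + 1)), p.2 = dist + 1 := by
        intro p hp
        obtain ⟨n, _, rfl⟩ := List.mem_map.mp hp
        rfl
      have h3' : ∀ n d, (n, d) ∈ (queueB ++ new.map (fun n => (n, dist + 1))).drop (i + 1) →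
          (List.foldl (dsStepA dist) (distances, queueB.drop (i + 1))
            (PySem.Dict.getD ⟨graph⟩ node [])).1.get? n = some d := by
        intro n d hp
        rw [hq'] at hp
        rcases List.mem_append.mp hp with hold | hnw
        · exact hpres n d (h3 n d (hmemold _ hold))
        · obtain ⟨n2, hn2, he⟩ := List.mem_map.mp hnw
          have he1 : n2 = n := congrArg Prod.fst he
          have he2 : dist + 1 = d := congrArg Prod.snd he
          rw [← he2, ← he1]
          exact hnew n2 hn2
      have hsndle : ∀ p ∈ queueB.drop (i + 1), dist ≤ p.2 ∧ p.2 ≤ dist + 1 := by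
        intro p hp
        have h1 := hpc.1 p hp
        have h2 := h7b p (hmemold _ hp)
        rcases hheadcase with hc | ⟨_, hc⟩ <;> rcases h2 with h2 | ⟨_, h2⟩ <;>
          constructor <;> omega
      have h7a' : List.Pairwise (fun p q : String × Int => p.2 ≤ q.2)
          ((queueB ++ new.map (fun n => (n, dist + 1))).drop (i + 1)) := by
        rw [hq']
        rw [List.pairwise_append]
        refine ⟨hpc.2, ?_, ?_⟩
        · apply List.pairwise_of_forall_mem_list
          intro a ha b hb
          rw [hsndnew a ha, hsndnew b hb]
        · intro a ha b hb
          rw [hsndnew b hb]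
          exact (hsndle a ha).2
      rw [hdrop, dsLoopA_cons, dsLoopB_step graph fuel queueB i seen levels node dist hq]
      rw [show ((PySem.Dict.getD ⟨graph⟩ node []).foldl (dsStepA dist)
            (distances, queueB.drop (i + 1))).2
          = (queueB ++ new.map (fun n => (n, dist + 1))).drop (i + 1) by rw [hq']; exact hA2]
      rw [show ((PySem.Dict.getD ⟨graph⟩ node []).foldl (dsStepB dist) (seen, queueB)).2
          = queueB ++ new.map (fun n => (n, dist + 1)) from hB2]
      rcases hheadcase with hdist | ⟨hLne, hdist⟩
      · -- dist = Ls.length: open a new level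
        have hcont : levels.contains dist = false := by
          rw [Bool.eq_false_iff]
          intro hc
          rw [PySem.Dict.contains_iff_mem_keys, hkeys] at hc
          obtain ⟨j, hj, hje⟩ := List.mem_map.mp hc
          rw [List.mem_range] at hj
          omega
        have hflat : (Ls ++ [[node]]).flatten = Ls.flatten ++ [node] := by simp
        have := ih (queueB ++ new.map (fun n => (n, dist + 1))) (i + 1)
          ((List.foldl (dsStepA dist) (distances, queueB.drop (i + 1))
            (PySem.Dict.getD ⟨graph⟩ node [])).1)
          ((List.foldl (dsStepB dist) (seen, queueB) (PySem.Dict.getD ⟨graph⟩ node [])).1)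
          (levels.modify dist [] (· ++ [node]))
          (Ls ++ [[node]])
          hinv' h3' h7a'
          (by -- h7b'
            intro p hp
            rw [hq'] at hp
            rcases List.mem_append.mp hp with hold | hnw
            · right
              refine ⟨by simp, ?_⟩
              have hb1 := hsndle p hold
              have hb2 := h7b p (hmemold _ hold)
              simp only [List.length_append, List.length_cons, List.length_nil]
              push_cast
              rcases hb2 with h2 | ⟨_, h2⟩ <;> rw [hdist] at hb1 <;> omega
            · left
              rw [hsndnew p hnw]
              simp only [List.length_append, List.length_cons, List.length_nil]
              push_cast
              omega)
          (by -- keys'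
            rw [PySem.Dict.keys_modify, PySem.Dict.keys_insert_of_not_contains _ _ hcont,
              hkeys]
            simp only [List.length_append, List.length_cons, List.length_nil]
            rw [List.range_succ, List.map_append]
            simp [hdist])
          (by -- getD'
            intro j hj
            rw [PySem.Dict.getD_modify]
            by_cases hje : j = Ls.length
            · rw [if_pos (by rw [hje, hdist]),
                PySem.Dict.getD_of_not_contains _ _ hcont]
              subst hje
              simp
            · have hjlt : j < Ls.length := by
                simp only [List.length_append, List.length_cons, List.length_nil] at hj
                omega
              rw [if_neg (by rw [hdist]; intro hc; exact hje (by exact_mod_cast hc)),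
                hgetD j hjlt, List.getElem_append_left hjlt])
          (by -- h6'
            intro j hj x hx
            by_cases hje : j = Ls.length
            · subst hje
              have hEq : (Ls ++ [[node]])[Ls.length]'(by simp) = [node] := by
                rw [List.getElem_append_right (le_refl Ls.length)]
                simp
              rw [hEq] at hx
              have hxe : x = node := by simpa using hx
              subst hxe
              rw [hpres x dist hhead3, hdist]
            · have hjlt : j < Ls.length := by
                simp only [List.length_append, List.length_cons, List.length_nil] at hj
                omega
              rw [List.getElem_append_left hjlt] at hx
              exact hpres x _ (h6 j hjlt x hx))
        obtain ⟨LsF, c1, c2, c3, c4⟩ := this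
        rw [hflat] at c1 c2
        exact ⟨LsF, c1, c2, c3, c4⟩
      · -- dist = Ls.length - 1: extend the last level
        have hlpos : 0 < Ls.length := List.length_pos_of_ne_nil hLne
        have hcast : ((Ls.length - 1 : Nat) : Int) = (Ls.length : Int) - 1 := by
          push_cast [hlpos]; ring
        have hcont : levels.contains dist = true := by
          rw [PySem.Dict.contains_iff_mem_keys, hkeys]
          apply List.mem_map.mpr
          exact ⟨Ls.length - 1, List.mem_range.mpr (by omega), by rw [hcast, hdist]⟩
        have hlen' : (Ls.dropLast ++ [Ls.getLast hLne ++ [node]]).length = Ls.length := by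
          simp only [List.length_append, List.length_dropLast, List.length_cons,
            List.length_nil]
          omega
        have hflat : (Ls.dropLast ++ [Ls.getLast hLne ++ [node]]).flatten
            = Ls.flatten ++ [node] := by
          conv_rhs => rw [← List.dropLast_append_getLast hLne]
          simp
        have hgetlast : Ls.getLast hLne = Ls[Ls.length - 1] := List.getLast_eq_getElem hLne
        have hgetE : ∀ (j : Nat) (hj : j < Ls.length),
            (Ls.dropLast ++ [Ls.getLast hLne ++ [node]])[j]'(by omega) =
              if j = Ls.length - 1 then Ls[j] ++ [node] else Ls[j] := by
          intro j hj
          by_cases hje : j = Ls.length - 1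
          · rw [if_pos hje]
            subst hje
            rw [List.getElem_append_right (by simp only [List.length_dropLast]; omega)]
            simp [List.length_dropLast, hgetlast]
          · rw [if_neg hje]
            rw [List.getElem_append_left (by simp only [List.length_dropLast]; omega)]
            exact List.getElem_dropLast _
        have := ih (queueB ++ new.map (fun n => (n, dist + 1))) (i + 1)
          ((List.foldl (dsStepA dist) (distances, queueB.drop (i + 1))
            (PySem.Dict.getD ⟨graph⟩ node [])).1)
          ((List.foldl (dsStepB dist) (seen, queueB) (PySem.Dict.getD ⟨graph⟩ node [])).1)
          (levels.modify dist [] (· ++ [node]))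
          (Ls.dropLast ++ [Ls.getLast hLne ++ [node]])
          hinv' h3' h7a'
          (by -- h7b'
            intro p hp
            rw [hq'] at hp
            rw [hlen']
            rcases List.mem_append.mp hp with hold | hnw
            · rcases h7b p (hmemold _ hold) with h2 | ⟨_, h2⟩
              · left; exact h2
              · right; exact ⟨by simp, h2⟩
            · left
              rw [hsndnew p hnw, hdist]
              ring)
          (by -- keys'
            rw [PySem.Dict.keys_modify, PySem.Dict.keys_insert_of_contains _ _ hcont,
              hkeys, hlen'])
          (by -- getD'
            intro j hj
            rw [hlen'] at hj
            rw [PySem.Dict.getD_modify, hgetE j hj]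
            by_cases hje : j = Ls.length - 1
            · rw [if_pos (by subst hje; rw [hdist, ← hcast]), if_pos hje]
              rw [show dist = ((j : Nat) : Int) from by rw [hdist, ← hcast, hje]]
              rw [hgetD j hj]
            · rw [if_neg (by rw [hdist]; intro hc; apply hje; omega), if_neg hje]
              exact hgetD j hj)
          (by -- h6'
            intro j hj x hx
            rw [hlen'] at hj
            rw [hgetE j hj] at hx
            by_cases hje : j = Ls.length - 1
            · rw [if_pos hje] at hx
              rcases List.mem_append.mp hx with hxl | hxn
              · exact hpres x _ (h6 j hj x hxl)
              · have : x = node := by simpa using hxn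
                subst this
                rw [hpres x dist hhead3, hdist, hje, hcast]
            · rw [if_neg hje] at hx
              exact hpres x _ (h6 j hj x hx))
        obtain ⟨LsF, c1, c2, c3, c4⟩ := this
        rw [hflat] at c1 c2
        exact ⟨LsF, c1, c2, c3, c4⟩

theorem dsInsertBySplit {α : Type} (bef : α → α → Bool) (y : α) :
    ∀ (S X : List α), (∀ x ∈ X, bef y x = true) →
    PySem.List.insertBy bef y (S ++ X) = PySem.List.insertBy bef y S ++ X := by
  intro S X hX
  induction S with
  | nil =>
    cases X with
    | nil => simp
    | cons x X' => simp [PySem.List.insertBy, hX x (by simp)]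
  | cons s S' ih =>
    by_cases h : bef y s
    · simp [PySem.List.insertBy, h]
    · simp [PySem.List.insertBy, h, ih]

theorem dsFoldInsertSplit {α : Type} (bef : α → α → Bool) :
    ∀ (ys S X : List α), (∀ y ∈ ys, ∀ x ∈ X, bef y x = true) →
    ys.foldl (fun acc y => PySem.List.insertBy bef y acc) (S ++ X)
      = ys.foldl (fun acc y => PySem.List.insertBy bef y acc) S ++ X := by
  intro ys
  induction ys with
  | nil => intro S X h; rfl
  | cons y ys' ih =>
    intro S X h
    simp only [List.foldl_cons]
    rw [dsInsertBySplit bef y S X (h y (by simp)),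
        ih _ X (fun y' hy' => h y' (by simp [hy']))]

theorem dsSortedRevAppend (key : String → Int) (xs ys : List String)
    (h : ∀ x ∈ xs, ∀ y ∈ ys, key x < key y) :
    PySem.List.sorted (xs ++ ys) key true
      = PySem.List.sorted ys key true ++ PySem.List.sorted xs key true := by
  rw [PySem.List.sorted_rev_eq_foldl_insertBy, PySem.List.sorted_rev_eq_foldl_insertBy,
      PySem.List.sorted_rev_eq_foldl_insertBy, List.foldl_append]
  have : ys.foldl (fun acc x => PySem.List.insertBy (fun a b => decide (key b < key a)) x acc)
      ([] ++ xs.foldl (fun acc x => PySem.List.insertBy (fun a b => decide (key b < key a)) x acc) [])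
      = ys.foldl (fun acc x => PySem.List.insertBy (fun a b => decide (key b < key a)) x acc) []
        ++ xs.foldl (fun acc x => PySem.List.insertBy (fun a b => decide (key b < key a)) x acc) [] := by
    apply dsFoldInsertSplit
    intro y hy x hx
    have hx' : x ∈ xs := by
      have := PySem.List.mem_sorted (xs := xs) (key := key) (rev := true) (x := x)
      rw [PySem.List.sorted_rev_eq_foldl_insertBy] at this
      exact this.mp hx
    simpa using h x hx' y hy
  simpa using this

theorem dsPyRangeDesc (m : Nat) :
    PySem.List.pyRange ((m : Int) - 1) (-1) (-1)
      = (List.range m).map (fun k : Nat => (m : Int) - 1 - (k : Int)) := by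
  cases m with
  | zero => simp [PySem.List.pyRange]
  | succ n =>
    simp only [PySem.List.pyRange]
    rw [if_neg (by norm_num : ¬((-1 : Int) = 0))]
    rw [if_neg (by norm_num : ¬((0 : Int) < -1)), if_pos (by push_cast; omega :
         (-1 : Int) < (↑(n+1) : Int) - 1)]
    have hc : (((↑(n+1) : Int) - 1 - (-1) + -(-1) - 1) / -(-1)).toNat = n + 1 := by
      push_cast; omega
    rw [hc]
    apply List.map_congr_left
    intro k hk
    push_cast
    ring

theorem dsSortedBlocks :
    ∀ (Ls : List (List String)) (key : String → Int) (c : Int),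
    (∀ (j : Nat) (h : j < Ls.length), ∀ x ∈ Ls[j], key x = c + j) →
    PySem.List.sorted Ls.flatten key true = Ls.reverse.flatten := by
  intro Ls
  induction Ls with
  | nil => intro key c h; simp [PySem.List.sorted]
  | cons L Ls' ih =>
    intro key c h
    have hL : ∀ x ∈ L, key x = c := by
      intro x hx
      have := h 0 (by simp) x (by simpa using hx)
      simpa using this
    have htail : ∀ y ∈ Ls'.flatten, c + 1 ≤ key y := by
      intro y hy
      obtain ⟨l, hl, hyl⟩ := List.mem_flatten.mp hy
      obtain ⟨j, hj, rfl⟩ := List.mem_iff_getElem.mp hl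
      have := h (j + 1) (by simpa using hj) y (by simpa using hyl)
      omega
    have hsplit := dsSortedRevAppend key L Ls'.flatten
      (fun x hx y hy => by have := hL x hx; have := htail y hy; omega)
    have hLs : PySem.List.sorted L key true = L := by
      apply PySem.List.sorted_rev_eq_self_of_pairwise
      apply List.pairwise_of_forall_mem_list
      intro a ha b hb
      rw [hL a ha, hL b hb]
    have hrec : PySem.List.sorted Ls'.flatten key true = Ls'.reverse.flatten := by
      apply ih key (c + 1)
      intro j hj x hx
      have := h (j + 1) (by simpa using hj) x (by simpa using hx)
      rw [this]; push_cast; ring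
    simp only [List.flatten_cons]
    rw [hsplit, hLs, hrec]
    simp

theorem dsFoldDesc :
    ∀ (Ls : List (List String)) (c : Int) (levels : PySem.Dict Int (List String))
      (acc : List String),
    (∀ (j : Nat) (h : j < Ls.length), levels.getD (c + (j : Int)) [] = Ls[j]) →
    ((List.range Ls.length).map (fun k : Nat => c + ((Ls.length : Int) - 1 - (k : Int)))).foldl
        (fun out d => out ++ levels.getD d []) acc
      = acc ++ Ls.reverse.flatten := by
  intro Ls
  induction Ls with
  | nil => intro c levels acc h; simp
  | cons L Ls' ih =>
    intro c levels acc h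
    have hlen : (L :: Ls').length = Ls'.length + 1 := by simp
    rw [hlen, List.range_succ, List.map_append, List.foldl_append]
    have hmap : (List.range Ls'.length).map
          (fun k : Nat => c + ((↑(Ls'.length + 1) : Int) - 1 - (k : Int)))
        = (List.range Ls'.length).map
          (fun k : Nat => (c + 1) + ((Ls'.length : Int) - 1 - (k : Int))) := by
      apply List.map_congr_left
      intro k hk
      push_cast; ring
    rw [hmap, ih (c + 1) levels acc (by
      intro j hj
      have := h (j + 1) (by simpa using hj)
      simpa [show c + 1 + (j : Int) = c + (↑(j+1) : Int) by push_cast; ring] using this)]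
    have h0 : levels.getD c [] = L := by
      have := h 0 (by simp)
      simpa using this
    have hidx : c + ((↑(Ls'.length + 1) : Int) - 1 - (Ls'.length : Int)) = c := by
      push_cast; ring
    simp only [List.map_cons, List.map_nil, List.foldl_cons, List.foldl_nil]
    rw [hidx, h0]
    simp

-- ===== VERDICT (by name: the statement is the Claim_ definition above) =====
theorem distance_sensitive_linearization_spec : Claim_equal_distance_sensitive_linearization := by
  unfold Claim_equal_distance_sensitive_linearization
  intro graph anchor _
  unfold Spec_distance_sensitive_linearization
  unfold distance_sensitive_linearization distance_sensitive_linearization_alt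
  obtain ⟨LsF, c1, c2, c3, c4⟩ := dsMain graph (dsFuel graph) [(anchor, 0)] 0
      (PySem.Dict.mk [(anchor, 0)]) (PySem.Set.ofList [anchor]) (PySem.Dict.mk []) []
      (by intro s; simp [PySem.Set.mem_ofList]; tauto)
      (by intro n d h
          simp only [List.drop_zero, List.mem_singleton] at h
          have h1 : n = anchor := congrArg Prod.fst h
          have h2 : d = 0 := congrArg Prod.snd h
          subst h1; subst h2
          simp [PySem.Dict.get?_mk_cons])
      (by simp)
      (by intro p hp
          simp only [List.drop_zero, List.mem_singleton] at hp
          left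
          rw [hp]
          simp)
      (by simp)
      (by intro j hj; exact absurd hj (Nat.not_lt_zero j))
      (by intro j hj; exact absurd hj (Nat.not_lt_zero j))
  simp only [List.drop_zero, List.flatten_nil] at c1 c2 c3 c4
  show PySem.List.sorted
        (dsLoopA graph (dsFuel graph) [(anchor, 0)] (PySem.Dict.mk [(anchor, 0)]) []).1
        (fun x =>
          (dsLoopA graph (dsFuel graph) [(anchor, 0)] (PySem.Dict.mk [(anchor, 0)]) []).2.getD x 0)
        true
      = (PySem.List.pyRange
          (((dsLoopB graph (dsFuel graph) [(anchor, 0)] 0 (PySem.Set.ofList [anchor])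
              (PySem.Dict.mk [])).size : Int) - 1) (-1) (-1)).foldl
          (fun out d => out ++ (dsLoopB graph (dsFuel graph) [(anchor, 0)] 0
              (PySem.Set.ofList [anchor]) (PySem.Dict.mk [])).getD d []) []
  rw [c1]
  rw [dsSortedBlocks LsF _ 0 (by
    intro j hj x hx
    rw [PySem.Dict.getD_eq_get?_getD, c2 j hj x hx]
    simp)]
  have hsize : (dsLoopB graph (dsFuel graph) [(anchor, 0)] 0 (PySem.Set.ofList [anchor])
      (PySem.Dict.mk [])).size = LsF.length := by
    have hlen := congrArg List.length c3
    simpa [PySem.Dict.keys, PySem.Dict.size] using hlen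
  rw [hsize, dsPyRangeDesc LsF.length]
  rw [show (fun k : Nat => (LsF.length : Int) - 1 - (k : Int))
        = (fun k : Nat => (0 : Int) + ((LsF.length : Int) - 1 - (k : Int))) from by
      funext k; ring]
  rw [dsFoldDesc LsF 0 _ [] (by
    intro j hj
    rw [show (0 : Int) + (j : Int) = (j : Int) by ring]
    exact c4 j hj)]
  simp
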